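-- pv_equiv track=rewrite | github.com/OthmaneBahri/Strategic-Matchstick-Engine | JeuAllumOrdiGagnant.py | valJeuAllumettes
-- ===== SOURCE A (Python) =====
-- def sumNimXOR(nim1, nim2):
--     return nim1^nim2
--
-- def mex(l):
--     if l==[]:
--        return 0
--     n=0
--     for i in range(len(l)+1):
--         if n in l:
--             n=n+1
--         if n not in l:
--             return n
--
-- def valPileAllumettes(n,r):
--     res=[]
--     if n <=0:
--         return 0
--     for i in r:
--         if i <= n:
--             val=valPileAllumettes((n-i),r)
--             res.append(val)
--     return mex(res)
--
-- def valJeuAllumettes(l,r):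
--     resf=[]
--     if l ==[]:
--         return 0
--     for i in l:
--         a=valPileAllumettes(i,r)
--         resf.append(a)
--     resa=0
--     for x in resf:
--         resa=sumNimXOR(resa,x)
--     return resa
-- ===== SOURCE B (Python) =====
-- def valJeuAllumettes(l, r):
--     if l == []:
--         return 0
--     m = max(max(l), 0)
--     g = [0]
--     for n in range(1, m + 1):
--         opts = [g[n - i] for i in r if i <= n]
--         x = 0
--         while x in opts:
--             x = x + 1
--         g.append(x)
--     res = 0
--     for v in l:
--         res = res ^ (g[v] if v > 0 else 0)
--     return res
-- ===== Notes on version B (the rewrite author's own statement) =====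
-- stated objective: alternative
-- what changed: Replaces the naive per-pile Grundy recursion by one bottom-up DP table of Grundy values for 0..max(l), then XORs table lookups; the DP avoids A's exponential recursion on branchy inputs but always pays O(max(l)*|r|), so it trades worst-case blowup for a fixed table cost.
import Mathlib
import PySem

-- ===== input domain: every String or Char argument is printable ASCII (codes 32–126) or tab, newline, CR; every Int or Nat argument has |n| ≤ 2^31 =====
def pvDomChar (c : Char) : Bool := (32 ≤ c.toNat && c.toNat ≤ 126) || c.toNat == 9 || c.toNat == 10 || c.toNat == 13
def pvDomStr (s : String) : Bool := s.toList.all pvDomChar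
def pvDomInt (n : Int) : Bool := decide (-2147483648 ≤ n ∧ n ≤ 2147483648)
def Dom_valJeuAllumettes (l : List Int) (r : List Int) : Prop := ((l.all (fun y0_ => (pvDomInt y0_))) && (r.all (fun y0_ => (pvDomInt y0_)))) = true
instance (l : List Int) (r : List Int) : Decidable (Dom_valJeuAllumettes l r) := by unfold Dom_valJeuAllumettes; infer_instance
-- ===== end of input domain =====

-- B replaces A's naive per-pile Grundy recursion by one bottom-up DP table of Grundy
-- values over 0..max(l), then XORs table lookups (objective: alternative algorithm --
-- it avoids A's exponential recursion at the price of always building the full table).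

-- ===== PORT A =====
def sumNimXOR (nim1 : Int) (nim2 : Int) : Int := PySem.Int.bxor nim1 nim2

-- the 'for i in range(len(l)+1)' loop of mex, with its early return; fuel = number of remaining iterations
def mexALoop (fuel : Nat) (n : Int) (l : List Int) : Int :=
  match fuel with
  | 0 => n  -- loop exhausted (Python would return None; never reached: the loop always returns)
  | f + 1 =>
    let n' := if n ∈ l then n + 1 else n
    if n' ∈ l then mexALoop f n' l else n'

def mexA (l : List Int) : Int :=
  if l = [] then 0 else mexALoop (l.length + 1) 0 l

-- valPileAllumettes; Python's recursion on n-i is made total with fuel = n.toNat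
-- (each recursive call decreases n by i, inside Pre_ i ≥ 1, so this fuel is enough)
def valPileAF (fuel : Nat) (n : Int) (r : List Int) : Int :=
  match fuel with
  | 0 => 0  -- only reached with n ≤ 0 under Pre_, where Python returns 0
  | f + 1 =>
    if n ≤ 0 then 0
    else
      mexA (r.foldl (fun acc i => if i ≤ n then acc ++ [valPileAF f (n - i) r] else acc) [])

def valJeuAllumettes (l : List Int) (r : List Int) : Int :=
  if l = [] then 0
  else
    (l.map (fun i => valPileAF i.toNat i r)).foldl (fun resa x => sumNimXOR resa x) 0

-- ===== PORT B =====
-- the 'while x in opts: x += 1' loop; fuel = opts.length + 1 iterations always suffice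
def mexBLoop (fuel : Nat) (x : Int) (opts : List Int) : Int :=
  match fuel with
  | 0 => x  -- never reached: at most opts.length increments can happen
  | f + 1 => if x ∈ opts then mexBLoop f (x + 1) opts else x

def valJeuAllumettes_alt (l : List Int) (r : List Int) : Int :=
  if l = [] then 0
  else
    let m : Int := max ((PySem.List.max? l (fun y => y)).getD 0) 0
    let g : List Int :=
      (PySem.List.pyRange 1 (m + 1) 1).foldl
        (fun g n =>
          let opts := (r.filter (fun i => i ≤ n)).map (fun i => PySem.List.pyGetD g (n - i) 0)
          g ++ [mexBLoop (opts.length + 1) 0 opts])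
        [0]
    l.foldl (fun res v => PySem.Int.bxor res (if 0 < v then PySem.List.pyGetD g v 0 else 0)) 0

-- ===== PRECONDITION & SPEC =====
-- Pre_ excludes inputs where some pile is positive and some removal amount in r is ≤ 0:
-- there A's recursion valPileAllumettes(n-i,r) does not decrease n and Python raises RecursionError.
def Pre_valJeuAllumettes (l : List Int) (r : List Int) : Prop :=
  (∀ i ∈ r, 1 ≤ i) ∨ (∀ v ∈ l, v ≤ 0)
instance (l : List Int) (r : List Int) : Decidable (Pre_valJeuAllumettes l r) := by
  unfold Pre_valJeuAllumettes; infer_instance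

def pvWitness_valJeuAllumettes : List Int × List Int := ([3, 5, 2], [1, 2, 3])

def Spec_valJeuAllumettes (l : List Int) (r : List Int) (out : Int) : Prop := out = valJeuAllumettes_alt l r
instance (l : List Int) (r : List Int) (out : Int) : Decidable (Spec_valJeuAllumettes l r out) := by unfold Spec_valJeuAllumettes; infer_instance

-- ===== CLAIM (what is proved, stated in full; the proofs are below) =====
def Claim_equal_valJeuAllumettes : Prop := ∀ (l : List Int) (r : List Int), Dom_valJeuAllumettes l r → Pre_valJeuAllumettes l r → Spec_valJeuAllumettes l r (valJeuAllumettes l r)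

-- ===== LEMMAS AND PROOFS =====

-- number of distinct elements of l that are ≥ n: the bound on remaining mex-loop steps
def mexCount (l : List Int) (n : Int) : Nat := (l.toFinset.filter (fun x => n ≤ x)).card

theorem mexCount_le (l : List Int) (n : Int) : mexCount l n ≤ l.length :=
  (Finset.card_filter_le _ _).trans l.toFinset_card_le

theorem mexCount_succ (l : List Int) (n : Int) (h : n ∈ l) :
    mexCount l n = mexCount l (n + 1) + 1 := by
  unfold mexCount
  have hs : l.toFinset.filter (fun x => n ≤ x)
      = insert n (l.toFinset.filter (fun x => n + 1 ≤ x)) := by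
    ext x
    simp only [Finset.mem_filter, Finset.mem_insert, List.mem_toFinset]
    constructor
    · rintro ⟨hx, hle⟩
      rcases eq_or_lt_of_le hle with he | hl
      · exact Or.inl he.symm
      · exact Or.inr ⟨hx, by omega⟩
    · rintro (rfl | ⟨hx, hle⟩)
      · exact ⟨h, le_refl _⟩
      · exact ⟨hx, by omega⟩
  rw [hs, Finset.card_insert_of_notMem]
  simp only [Finset.mem_filter]
  rintro ⟨-, hle⟩; omega

theorem mex_loops_eq : ∀ (fA fB : Nat) (n : Int) (l : List Int),
    mexCount l n < fA → mexCount l n < fB → mexALoop fA n l = mexBLoop fB n l := by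
  intro fA
  induction fA with
  | zero => intro fB n l h; omega
  | succ f ih =>
    intro fB n l hA hB
    match fB, hB with
    | fb + 1, hB =>
      by_cases hn : n ∈ l
      · have hc := mexCount_succ l n hn
        by_cases hn1 : (n + 1) ∈ l
        · simp only [mexALoop, mexBLoop, hn, hn1, if_pos]
          exact ih fb (n + 1) l (by omega) (by omega)
        · have hfb : 1 ≤ fb := by omega
          match fb, hfb with
          | fb' + 1, _ =>
            simp [mexALoop, mexBLoop, hn, hn1]
      · simp [mexALoop, mexBLoop, hn]

theorem mexA_eq_mexB (xs : List Int) : mexA xs = mexBLoop (xs.length + 1) 0 xs := by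
  by_cases h : xs = []
  · subst h; simp [mexA, mexBLoop]
  · simp only [mexA, h, if_false]
    exact mex_loops_eq (xs.length + 1) (xs.length + 1) 0 xs
      (by have := mexCount_le xs 0; omega) (by have := mexCount_le xs 0; omega)

theorem valPileAF_nonpos (f : Nat) (n : Int) (r : List Int) (h : n ≤ 0) :
    valPileAF f n r = 0 := by
  cases f <;> simp [valPileAF, h]

theorem valPileAF_fuel (r : List Int) (hr : ∀ i ∈ r, 1 ≤ i) :
    ∀ (k : Nat) (n : Int) (f1 f2 : Nat), n.toNat ≤ k → n.toNat ≤ f1 → n.toNat ≤ f2 →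
      valPileAF f1 n r = valPileAF f2 n r := by
  intro k
  induction k with
  | zero =>
    intro n f1 f2 hk _ _
    have hn : n ≤ 0 := by omega
    rw [valPileAF_nonpos _ _ _ hn, valPileAF_nonpos _ _ _ hn]
  | succ k ih =>
    intro n f1 f2 hk h1 h2
    by_cases hn : n ≤ 0
    · rw [valPileAF_nonpos _ _ _ hn, valPileAF_nonpos _ _ _ hn]
    · have hpos : 0 < n := by omega
      have hf1 : 1 ≤ f1 := by omega
      have hf2 : 1 ≤ f2 := by omega
      match f1, f2, hf1, hf2 with
      | a + 1, b + 1, _, _ =>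
        simp only [valPileAF, hn, if_false]
        congr 1
        apply PySem.List.foldl_congr_mem
        intro acc i hi
        by_cases hin : i ≤ n
        · simp only [hin, if_pos]
          have h1i := hr i hi
          congr 2
          exact ih (n - i) a b (by omega) (by omega) (by omega)
        · simp [hin]

-- the canonical Grundy value (fuel = the pile itself)
def gr (r : List Int) (k : Nat) : Int := valPileAF k (k : Int) r

theorem foldl_append_if_le (n : Int) (f : Int → Int) : ∀ (l : List Int) (acc : List Int),
    l.foldl (fun acc i => if i ≤ n then acc ++ [f i] else acc) acc
      = acc ++ (l.filter (fun i => i ≤ n)).map f := by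
  intro l
  induction l with
  | nil => intro acc; simp
  | cons x xs ih => intro acc; by_cases h : x ≤ n <;> simp [h, ih]

theorem table_inv (r : List Int) (hr : ∀ i ∈ r, 1 ≤ i) : ∀ (t : Nat),
    (PySem.List.pyRange 1 ((t : Int) + 1) 1).foldl
        (fun g n =>
          let opts := (r.filter (fun i => i ≤ n)).map (fun i => PySem.List.pyGetD g (n - i) 0)
          g ++ [mexBLoop (opts.length + 1) 0 opts])
        [0]
      = (List.range (t + 1)).map (fun j => gr r j) := by
  intro t
  induction t with
  | zero =>
    rw [PySem.List.pyRange_one_eq_nil (by omega)]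
    simp [gr, valPileAF]
  | succ t ih =>
    have hsplit : PySem.List.pyRange 1 ((↑(t + 1) : Int) + 1) 1
        = PySem.List.pyRange 1 ((t : Int) + 1) 1 ++ [(t : Int) + 1] := by
      push_cast
      exact PySem.List.pyRange_one_succ_right (by omega)
    rw [hsplit, List.foldl_append, ih]
    simp only [List.foldl_cons, List.foldl_nil]
    rw [List.range_succ (n := t + 1), List.map_append]
    congr 1
    have hopts : (r.filter (fun i => i ≤ (t : Int) + 1)).map
          (fun i => PySem.List.pyGetD ((List.range (t + 1)).map (fun j => gr r j)) ((t : Int) + 1 - i) 0)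
        = (r.filter (fun i => i ≤ (t : Int) + 1)).map
          (fun i => valPileAF t ((t : Int) + 1 - i) r) := by
      apply List.map_congr_left
      intro i hi
      have hmem := List.mem_of_mem_filter hi
      have hle : i ≤ (t : Int) + 1 := by
        have := List.of_mem_filter hi; simpa using this
      have h1 : 1 ≤ i := hr i hmem
      have hnn : 0 ≤ (t : Int) + 1 - i := by omega
      have hlt : ((t : Int) + 1 - i).toNat < t + 1 := by omega
      rw [PySem.List.pyGetD_of_nonneg]
      rw [List.getD_eq_getElem?_getD, List.getElem?_map, List.getElem?_range hlt]
      simp only [Option.map_some, Option.getD_some]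
      show gr r ((t : Int) + 1 - i).toNat = _
      unfold gr
      have hcast : ((((t : Int) + 1 - i).toNat : Int)) = (t : Int) + 1 - i := by omega
      rw [hcast]
      exact valPileAF_fuel r hr t ((t : Int) + 1 - i) _ t (by omega) (by omega) (by omega)
      omega
    rw [hopts]
    have hA : gr r (t + 1) = mexA ((r.filter (fun i => i ≤ (t : Int) + 1)).map
        (fun i => valPileAF t ((t : Int) + 1 - i) r)) := by
      unfold gr
      have hc : ((t + 1 : Nat) : Int) = (t : Int) + 1 := by push_cast; ring
      rw [hc]
      have hpos : ¬ (((t : Int) + 1) ≤ 0) := by omega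
      simp only [valPileAF, hpos, if_false]
      rw [foldl_append_if_le ((t : Int) + 1) (fun i => valPileAF t ((t : Int) + 1 - i) r) r []]
      simp
    simp only [List.map_cons, List.map_nil]
    rw [hA, mexA_eq_mexB]

theorem foldl_const {α β : Type} (l : List β) (init : α) :
    l.foldl (fun acc _ => acc) init = init := by
  induction l <;> simp_all [List.foldl]

-- ===== VERDICT (by name: the statement is the Claim_ definition above) =====
theorem valJeuAllumettes_spec : Claim_equal_valJeuAllumettes := by
  intro l r _ hpre
  unfold Spec_valJeuAllumettes
  by_cases hl : l = []
  · subst hl; simp [valJeuAllumettes, valJeuAllumettes_alt]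
  · obtain ⟨mv, hmv⟩ : ∃ mv, PySem.List.max? l (fun y => y) = some mv := by
      match l, hl with
      | x :: t, _ => exact ⟨List.foldl max x t, PySem.List.max?_id_cons x t⟩
    have hmvmem : mv ∈ l := PySem.List.max?_mem hmv
    have hmvmax : ∀ y ∈ l, y ≤ mv := fun y hy => PySem.List.max?_isMax hmv y hy
    rcases hpre with hr | hneg
    · -- all removal amounts are ≥ 1: relate A's recursion to B's table via table_inv
      unfold valJeuAllumettes valJeuAllumettes_alt
      simp only [hl, if_false, hmv, Option.getD_some]
      have hm0 : 0 ≤ max mv 0 := le_max_right _ _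
      have hmc : max mv 0 = ((max mv 0).toNat : Int) := by omega
      rw [hmc, table_inv r hr ((max mv 0).toNat), List.foldl_map]
      apply PySem.List.foldl_congr_mem
      intro acc v hv
      by_cases hvpos : 0 < v
      · have hvle : v ≤ max mv 0 := le_trans (hmvmax v hv) (le_max_left _ _)
        have hlt : v.toNat < (max mv 0).toNat + 1 := by omega
        rw [if_pos hvpos, PySem.List.pyGetD_of_nonneg]
        · rw [List.getD_eq_getElem?_getD, List.getElem?_map, List.getElem?_range hlt]
          simp only [Option.map_some, Option.getD_some]
          unfold sumNimXOR gr
          congr 1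
          congr 1
          omega
        · omega
      · rw [if_neg hvpos, valPileAF_nonpos _ _ _ (by omega)]
        rfl
    · -- every pile is ≤ 0: both sides compute 0
      unfold valJeuAllumettes valJeuAllumettes_alt
      simp only [hl, if_false, hmv, Option.getD_some]
      have hmv0 : mv ≤ 0 := hneg mv hmvmem
      have hm : max mv 0 = 0 := by omega
      rw [hm, List.foldl_map]
      have hA : l.foldl (fun resa v => sumNimXOR resa (valPileAF v.toNat v r)) 0
          = l.foldl (fun (acc : Int) (_ : Int) => acc) 0 := by
        apply PySem.List.foldl_congr_mem
        intro acc v hv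
        rw [valPileAF_nonpos _ _ _ (hneg v hv)]
        simp [sumNimXOR]
      have hB : l.foldl (fun res v => PySem.Int.bxor res
            (if 0 < v then PySem.List.pyGetD
              ((PySem.List.pyRange 1 (0 + 1) 1).foldl
                (fun g n =>
                  let opts := (r.filter (fun i => i ≤ n)).map (fun i => PySem.List.pyGetD g (n - i) 0)
                  g ++ [mexBLoop (opts.length + 1) 0 opts]) [0]) v 0 else 0)) 0
          = l.foldl (fun (acc : Int) (_ : Int) => acc) 0 := by
        apply PySem.List.foldl_congr_mem
        intro acc v hv
        rw [if_neg (by have := hneg v hv; omega)]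
        simp
      rw [hA, hB, foldl_const]
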